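-- pv_equiv track=rewrite | github.com/MmMaiIIi/eAlignment | align/data.py | _sft_rejection_breakdown
-- ===== SOURCE A (Python) =====
-- from collections import Counter
-- from typing import Any, Mapping
--
-- def _sft_rejection_breakdown(rejected_rows: list[dict[str, Any]]) -> dict[str, int]:
--     counts = Counter(
--         {
--             "missing_query": 0,
--             "missing_response": 0,
--             "malformed_dialogue": 0,
--             "unparseable_turns": 0,
--             "other_hard_failure": 0,
--         }
--     )
--     for row in rejected_rows:
--         errors = [str(err).lower() for err in row.get("errors", [])]
--         text = " | ".join(errors)
--         if "missing query text" in text: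
--             counts["missing_query"] += 1
--         elif "missing response text" in text:
--             counts["missing_response"] += 1
--         elif "malformed dialogue" in text:
--             counts["malformed_dialogue"] += 1
--         elif "unparseable turns" in text:
--             counts["unparseable_turns"] += 1
--         else:
--             counts["other_hard_failure"] += 1
--     return dict(counts)
-- ===== SOURCE B (Python) =====
-- from typing import Any
--
-- PATTERNS = [
--     ("missing query text", "missing_query"),
--     ("missing response text", "missing_response"),
--     ("malformed dialogue", "malformed_dialogue"),
--     ("unparseable turns", "unparseable_turns"),
-- ]
--
-- def _sft_rejection_breakdown(rejected_rows: list[dict[str, Any]]) -> dict[str, int]: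
--     # Pattern-major sieve: join each row's errors once, then for each pattern in
--     # priority order peel off the matching texts from the remaining pool.
--     remaining = [
--         " | ".join(str(err).lower() for err in row.get("errors", []))
--         for row in rejected_rows
--     ]
--     counts = {}
--     for sub, key in PATTERNS:
--         counts[key] = sum(1 for t in remaining if sub in t)
--         remaining = [t for t in remaining if sub not in t]
--     counts["other_hard_failure"] = len(remaining)
--     return counts
-- ===== Notes on version B (the rewrite author's own statement) =====
-- stated objective: alternative
-- what changed: Replaces A's row-major pass with a per-row if/elif chain mutating a Counter by a pattern-major sieve: the error texts are joined once, then for each pattern in priority order the matching texts are counted and removed from the remaining pool, the leftover pool length becoming other_hard_failure.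
import Mathlib
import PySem

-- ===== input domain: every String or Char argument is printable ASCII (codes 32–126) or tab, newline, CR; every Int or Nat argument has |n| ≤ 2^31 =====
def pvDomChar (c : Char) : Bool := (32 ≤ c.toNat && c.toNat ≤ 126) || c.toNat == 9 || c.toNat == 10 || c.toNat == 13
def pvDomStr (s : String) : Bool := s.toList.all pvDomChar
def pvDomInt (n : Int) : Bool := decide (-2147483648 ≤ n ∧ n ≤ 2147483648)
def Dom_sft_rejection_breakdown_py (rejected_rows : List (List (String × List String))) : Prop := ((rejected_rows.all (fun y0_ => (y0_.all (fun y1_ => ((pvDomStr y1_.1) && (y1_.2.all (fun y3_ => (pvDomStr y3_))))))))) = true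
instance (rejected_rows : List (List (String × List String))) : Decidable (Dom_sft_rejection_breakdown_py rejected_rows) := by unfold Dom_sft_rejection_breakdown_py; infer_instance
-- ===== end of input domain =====

-- B replaces A's row-major if/elif Counter pass by a pattern-major sieve that counts and removes matching joined texts per pattern in priority order; objective: alternative.


-- ===== PORT A =====
-- row.get("errors", []): first-match lookup in the association list
def pyRowErrors (row : List (String × List String)) : List String :=
  ((row.find? (fun p => p.1 == "errors")).map (fun p => p.2)).getD []

-- the body of A's 'for row in rejected_rows' loop
def aStep (counts : PySem.Dict String Int) (row : List (String × List String)) : PySem.Dict String Int :=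
  let errors := (pyRowErrors row).map PySem.Str.lower
  let text := PySem.Str.join " | " errors
  if PySem.Str.isIn "missing query text" text then counts.modify "missing_query" 0 (· + 1)
  else if PySem.Str.isIn "missing response text" text then counts.modify "missing_response" 0 (· + 1)
  else if PySem.Str.isIn "malformed dialogue" text then counts.modify "malformed_dialogue" 0 (· + 1)
  else if PySem.Str.isIn "unparseable turns" text then counts.modify "unparseable_turns" 0 (· + 1)
  else counts.modify "other_hard_failure" 0 (· + 1)

def sft_rejection_breakdown_py (rejected_rows : List (List (String × List String))) : List (String × Int) :=
  let counts : PySem.Dict String Int := PySem.Dict.ofList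
    [("missing_query", 0), ("missing_response", 0), ("malformed_dialogue", 0),
     ("unparseable_turns", 0), ("other_hard_failure", 0)]
  (rejected_rows.foldl aStep counts).items

-- ===== PORT B =====
def pvPatterns : List (String × String) :=
  [("missing query text", "missing_query"), ("missing response text", "missing_response"),
   ("malformed dialogue", "malformed_dialogue"), ("unparseable turns", "unparseable_turns")]

-- the joined, lower-cased error text of one row
def textOf (row : List (String × List String)) : String :=
  PySem.Str.join " | " ((pyRowErrors row).map PySem.Str.lower)

-- one iteration of B's 'for sub, key in PATTERNS' loop: count matches, remove them from the pool
def bStep (st : List (String × Int) × List String) (p : String × String) :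
    List (String × Int) × List String :=
  (st.1 ++ [(p.2, (st.2.countP (fun t => PySem.Str.isIn p.1 t) : Int))],
   st.2.filter (fun t => !(PySem.Str.isIn p.1 t)))

def sft_rejection_breakdown_py_alt (rejected_rows : List (List (String × List String))) : List (String × Int) :=
  let remaining := rejected_rows.map textOf
  let st := pvPatterns.foldl bStep ([], remaining)
  st.1 ++ [("other_hard_failure", (st.2.length : Int))]

-- ===== PRECONDITION & SPEC =====
def Spec_sft_rejection_breakdown_py (rejected_rows : List (List (String × List String))) (out : List (String × Int)) : Prop := out = sft_rejection_breakdown_py_alt rejected_rows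
instance (rejected_rows : List (List (String × List String))) (out : List (String × Int)) : Decidable (Spec_sft_rejection_breakdown_py rejected_rows out) := by unfold Spec_sft_rejection_breakdown_py; infer_instance

-- ===== CLAIM (what is proved, stated in full; the proofs are below) =====
def Claim_equal_sft_rejection_breakdown_py : Prop := ∀ (rejected_rows : List (List (String × List String))), Dom_sft_rejection_breakdown_py rejected_rows → Spec_sft_rejection_breakdown_py rejected_rows (sft_rejection_breakdown_py rejected_rows)

-- ===== LEMMAS AND PROOFS =====
def q1 (t : String) : Bool := PySem.Str.isIn "missing query text" t
def q2 (t : String) : Bool := PySem.Str.isIn "missing response text" t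
def q3 (t : String) : Bool := PySem.Str.isIn "malformed dialogue" t
def q4 (t : String) : Bool := PySem.Str.isIn "unparseable turns" t

-- the Counter's state: a dict on exactly the five keys, in order
def D5 (a b c d e : Int) : PySem.Dict String Int :=
  PySem.Dict.ofList
    [("missing_query", a), ("missing_response", b), ("malformed_dialogue", c),
     ("unparseable_turns", d), ("other_hard_failure", e)]

theorem items_D5 (a b c d e : Int) :
    (D5 a b c d e).items =
      [("missing_query", a), ("missing_response", b), ("malformed_dialogue", c),
       ("unparseable_turns", d), ("other_hard_failure", e)] := by
  simp [D5, PySem.Dict.ofList, PySem.Dict.empty, PySem.Dict.update,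
        PySem.Dict.insert, PySem.Dict.contains]

theorem aStep_eq (a b c d e : Int) (row : List (String × List String)) :
    aStep (D5 a b c d e) row =
      D5 (a + if q1 (textOf row) then 1 else 0)
         (b + if !q1 (textOf row) && q2 (textOf row) then 1 else 0)
         (c + if !q1 (textOf row) && !q2 (textOf row) && q3 (textOf row) then 1 else 0)
         (d + if !q1 (textOf row) && !q2 (textOf row) && !q3 (textOf row) && q4 (textOf row) then 1 else 0)
         (e + if !q1 (textOf row) && !q2 (textOf row) && !q3 (textOf row) && !q4 (textOf row) then 1 else 0) := by
  unfold aStep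
  show (if q1 (textOf row) then _ else if q2 (textOf row) then _ else if q3 (textOf row) then _
        else if q4 (textOf row) then _ else _) = _
  by_cases h1 : q1 (textOf row) <;> by_cases h2 : q2 (textOf row) <;>
    by_cases h3 : q3 (textOf row) <;> by_cases h4 : q4 (textOf row) <;>
    simp [h1, h2, h3, h4, D5, PySem.Dict.modify, PySem.Dict.ofList, PySem.Dict.empty,
      PySem.Dict.update, PySem.Dict.insert, PySem.Dict.contains, PySem.Dict.getD, PySem.Dict.get?]

theorem foldl_aStep_items (rows : List (List (String × List String))) :
    ∀ a b c d e : Int,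
      ((rows.foldl aStep (D5 a b c d e)).items) =
        [("missing_query", a + ((rows.map textOf).countP q1 : Int)),
         ("missing_response", b + ((rows.map textOf).countP (fun t => !q1 t && q2 t) : Int)),
         ("malformed_dialogue", c + ((rows.map textOf).countP (fun t => !q1 t && !q2 t && q3 t) : Int)),
         ("unparseable_turns", d + ((rows.map textOf).countP (fun t => !q1 t && !q2 t && !q3 t && q4 t) : Int)),
         ("other_hard_failure", e + ((rows.map textOf).countP (fun t => !q1 t && !q2 t && !q3 t && !q4 t) : Int))] := by
  induction rows with
  | nil => intro a b c d e; simp [items_D5]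
  | cons x rows ih =>
    intro a b c d e
    rw [List.foldl_cons, aStep_eq, ih]
    simp only [List.map_cons, List.countP_cons, List.cons.injEq, Prod.mk.injEq, true_and, and_true]
    refine ⟨?_, ?_, ?_, ?_, ?_⟩ <;> (split_ifs with h <;> simp [h] <;> push_cast <;> omega)

-- ===== VERDICT (by name: the statement is the Claim_ definition above) =====
theorem sft_rejection_breakdown_py_spec : Claim_equal_sft_rejection_breakdown_py := by
  intro rows _
  unfold Spec_sft_rejection_breakdown_py sft_rejection_breakdown_py sft_rejection_breakdown_py_alt
  dsimp only
  have h := foldl_aStep_items rows 0 0 0 0 0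
  simp only [D5] at h
  rw [h]
  simp only [pvPatterns, List.foldl_cons, List.foldl_nil, bStep, List.filter_filter,
    List.countP_filter, ← List.countP_eq_length_filter, List.nil_append, List.cons_append,
    List.singleton_append, List.append_nil, zero_add, q1, q2, q3, q4]
  refine congrArg₂ _ rfl (congrArg₂ _ ?_ (congrArg₂ _ ?_ (congrArg₂ _ ?_ (congrArg₂ _ ?_ rfl)))) <;>
    refine congrArg _ (congrArg _ (List.countP_congr ?_)) <;> intro t _ <;>
    cases PySem.Str.isIn "missing query text" t <;> cases PySem.Str.isIn "missing response text" t <;>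
    cases PySem.Str.isIn "malformed dialogue" t <;> cases PySem.Str.isIn "unparseable turns" t <;> rfl
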